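-- pv_equiv track=rewrite | github.com/ClickHouse/ClickHouse | tests/ci/build_report_check.py | group_by_artifacts
-- ===== SOURCE A (Python) =====
-- from typing import Dict, List, Tuple
--
-- def group_by_artifacts(build_urls: List[str]) -> Dict[str, List[str]]:
--     groups = {
--         "apk": [],
--         "deb": [],
--         "binary": [],
--         "tgz": [],
--         "rpm": [],
--         "performance": [],
--     }  # type: Dict[str, List[str]]
--     for url in build_urls:
--         if url.endswith("performance.tgz"):
--             groups["performance"].append(url)
--         elif (
--             url.endswith(".deb")
--             or url.endswith(".buildinfo")
--             or url.endswith(".changes")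
--             or url.endswith(".tar.gz")
--         ):
--             groups["deb"].append(url)
--         elif url.endswith(".apk"):
--             groups["apk"].append(url)
--         elif url.endswith(".rpm"):
--             groups["rpm"].append(url)
--         elif url.endswith(".tgz"):
--             groups["tgz"].append(url)
--         else:
--             groups["binary"].append(url)
--     return groups
-- ===== SOURCE B (Python) =====
-- def _classify(url):
--     if url.endswith("performance.tgz"):
--         return "performance"
--     for suffix, key in (
--         (".deb", "deb"),
--         (".buildinfo", "deb"),
--         (".changes", "deb"),
--         (".tar.gz", "deb"),
--         (".apk", "apk"),
--         (".rpm", "rpm"),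
--         (".tgz", "tgz"),
--     ):
--         if url.endswith(suffix):
--             return key
--     return "binary"
--
--
-- def group_by_artifacts(build_urls):
--     return {
--         key: [url for url in build_urls if _classify(url) == key]
--         for key in ("apk", "deb", "binary", "tgz", "rpm", "performance")
--     }
-- ===== Notes on version B (the rewrite author's own statement) =====
-- stated objective: simpler
-- what changed: Replaces A's single-pass dict-append loop by a classify function driven by an ordered suffix-rule table plus one filter-comprehension per group key.
import Mathlib
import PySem

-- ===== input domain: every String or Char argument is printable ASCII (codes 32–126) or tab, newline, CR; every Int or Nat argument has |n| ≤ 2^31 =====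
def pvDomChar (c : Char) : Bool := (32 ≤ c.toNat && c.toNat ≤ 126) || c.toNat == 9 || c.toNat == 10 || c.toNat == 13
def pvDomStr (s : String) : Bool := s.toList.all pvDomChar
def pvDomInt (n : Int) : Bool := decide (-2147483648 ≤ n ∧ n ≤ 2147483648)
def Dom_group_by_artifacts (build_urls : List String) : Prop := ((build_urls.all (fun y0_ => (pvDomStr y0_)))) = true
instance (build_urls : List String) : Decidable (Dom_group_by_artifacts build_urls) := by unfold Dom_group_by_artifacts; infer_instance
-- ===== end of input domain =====

-- B replaces A's single-pass dict-append loop by a classify-then-filter grouping (simpler decomposition, same O(n) cost).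

-- ===== PORT A =====
def group_by_artifacts (build_urls : List String) : List (String × List String) :=
  (build_urls.foldl (fun groups url =>
      if PySem.Str.endswith url "performance.tgz" then
        groups.modify "performance" [] (· ++ [url])
      else if PySem.Str.endswith url ".deb" || PySem.Str.endswith url ".buildinfo"
           || PySem.Str.endswith url ".changes" || PySem.Str.endswith url ".tar.gz" then
        groups.modify "deb" [] (· ++ [url])
      else if PySem.Str.endswith url ".apk" then
        groups.modify "apk" [] (· ++ [url])
      else if PySem.Str.endswith url ".rpm" then
        groups.modify "rpm" [] (· ++ [url])
      else if PySem.Str.endswith url ".tgz" then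
        groups.modify "tgz" [] (· ++ [url])
      else
        groups.modify "binary" [] (· ++ [url]))
    (PySem.Dict.ofList [("apk", []), ("deb", []), ("binary", []), ("tgz", []), ("rpm", []), ("performance", [])])).items

-- ===== PORT B =====
-- ordered rule table encoding the suffix precedence (after the "performance.tgz" check)
def pvRules : List (String × String) :=
  [(".deb", "deb"), (".buildinfo", "deb"), (".changes", "deb"), (".tar.gz", "deb"),
   (".apk", "apk"), (".rpm", "rpm"), (".tgz", "tgz")]

def pvWalk (rules : List (String × String)) (url : String) : String :=
  match rules with
  | [] => "binary"
  | (suffix, key) :: rest => if PySem.Str.endswith url suffix then key else pvWalk rest url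

def pvClassify (url : String) : String :=
  if PySem.Str.endswith url "performance.tgz" then "performance" else pvWalk pvRules url

def group_by_artifacts_alt (build_urls : List String) : List (String × List String) :=
  ["apk", "deb", "binary", "tgz", "rpm", "performance"].map
    (fun key => (key, build_urls.filter (fun url => pvClassify url == key)))

-- ===== PRECONDITION & SPEC =====
def Spec_group_by_artifacts (build_urls : List String) (out : List (String × List String)) : Prop := out = group_by_artifacts_alt build_urls
instance (build_urls : List String) (out : List (String × List String)) : Decidable (Spec_group_by_artifacts build_urls out) := by unfold Spec_group_by_artifacts; infer_instance

-- ===== CLAIM (what is proved, stated in full; the proofs are below) =====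
def Claim_equal_group_by_artifacts : Prop := ∀ (build_urls : List String), Dom_group_by_artifacts build_urls → Spec_group_by_artifacts build_urls (group_by_artifacts build_urls)

-- ===== LEMMAS AND PROOFS =====

-- proof helper: the six-key dict as one constructor
def pvMk6 (a b c t r p : List String) : PySem.Dict String (List String) :=
  PySem.Dict.mk [("apk", a), ("deb", b), ("binary", c), ("tgz", t), ("rpm", r), ("performance", p)]

-- A's loop body is exactly "append url to the group pvClassify url"
theorem stepfun_eq :
    (fun (groups : PySem.Dict String (List String)) url =>
      if PySem.Str.endswith url "performance.tgz" then
        groups.modify "performance" [] (· ++ [url])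
      else if PySem.Str.endswith url ".deb" || PySem.Str.endswith url ".buildinfo"
           || PySem.Str.endswith url ".changes" || PySem.Str.endswith url ".tar.gz" then
        groups.modify "deb" [] (· ++ [url])
      else if PySem.Str.endswith url ".apk" then
        groups.modify "apk" [] (· ++ [url])
      else if PySem.Str.endswith url ".rpm" then
        groups.modify "rpm" [] (· ++ [url])
      else if PySem.Str.endswith url ".tgz" then
        groups.modify "tgz" [] (· ++ [url])
      else
        groups.modify "binary" [] (· ++ [url]))
    = (fun groups url => groups.modify (pvClassify url) [] (· ++ [url])) := by
  funext groups url
  simp only [pvClassify, pvWalk, pvRules]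
  split_ifs <;> simp_all

-- invariant: the fold starting from a six-key dict ends as that dict with each group extended by its filter
theorem fold_invariant (l : List String) (a b c t r p : List String) :
    (l.foldl (fun groups url => groups.modify (pvClassify url) [] (· ++ [url]))
      (pvMk6 a b c t r p)).items
    = [("apk", a ++ l.filter (fun url => pvClassify url == "apk")),
       ("deb", b ++ l.filter (fun url => pvClassify url == "deb")),
       ("binary", c ++ l.filter (fun url => pvClassify url == "binary")),
       ("tgz", t ++ l.filter (fun url => pvClassify url == "tgz")),
       ("rpm", r ++ l.filter (fun url => pvClassify url == "rpm")),
       ("performance", p ++ l.filter (fun url => pvClassify url == "performance"))] := by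
  induction l generalizing a b c t r p with
  | nil => simp [pvMk6]
  | cons u us ih =>
    have hcases : pvClassify u = "apk" ∨ pvClassify u = "deb" ∨ pvClassify u = "binary"
        ∨ pvClassify u = "tgz" ∨ pvClassify u = "rpm" ∨ pvClassify u = "performance" := by
      simp only [pvClassify, pvWalk, pvRules]
      split_ifs <;> simp
    rcases hcases with h | h | h | h | h | h
    · rw [List.foldl_cons,
        show (pvMk6 a b c t r p).modify (pvClassify u) [] (· ++ [u])
            = pvMk6 (a ++ [u]) (b) (c) (t) (r) (p) from by
          rw [h]; simp [pvMk6, PySem.Dict.modify, PySem.Dict.insert, PySem.Dict.contains, PySem.Dict.get?, PySem.Dict.getD],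
        ih]
      simp [h]
    · rw [List.foldl_cons,
        show (pvMk6 a b c t r p).modify (pvClassify u) [] (· ++ [u])
            = pvMk6 (a) (b ++ [u]) (c) (t) (r) (p) from by
          rw [h]; simp [pvMk6, PySem.Dict.modify, PySem.Dict.insert, PySem.Dict.contains, PySem.Dict.get?, PySem.Dict.getD],
        ih]
      simp [h]
    · rw [List.foldl_cons,
        show (pvMk6 a b c t r p).modify (pvClassify u) [] (· ++ [u])
            = pvMk6 (a) (b) (c ++ [u]) (t) (r) (p) from by
          rw [h]; simp [pvMk6, PySem.Dict.modify, PySem.Dict.insert, PySem.Dict.contains, PySem.Dict.get?, PySem.Dict.getD],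
        ih]
      simp [h]
    · rw [List.foldl_cons,
        show (pvMk6 a b c t r p).modify (pvClassify u) [] (· ++ [u])
            = pvMk6 (a) (b) (c) (t ++ [u]) (r) (p) from by
          rw [h]; simp [pvMk6, PySem.Dict.modify, PySem.Dict.insert, PySem.Dict.contains, PySem.Dict.get?, PySem.Dict.getD],
        ih]
      simp [h]
    · rw [List.foldl_cons,
        show (pvMk6 a b c t r p).modify (pvClassify u) [] (· ++ [u])
            = pvMk6 (a) (b) (c) (t) (r ++ [u]) (p) from by
          rw [h]; simp [pvMk6, PySem.Dict.modify, PySem.Dict.insert, PySem.Dict.contains, PySem.Dict.get?, PySem.Dict.getD],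
        ih]
      simp [h]
    · rw [List.foldl_cons,
        show (pvMk6 a b c t r p).modify (pvClassify u) [] (· ++ [u])
            = pvMk6 (a) (b) (c) (t) (r) (p ++ [u]) from by
          rw [h]; simp [pvMk6, PySem.Dict.modify, PySem.Dict.insert, PySem.Dict.contains, PySem.Dict.get?, PySem.Dict.getD],
        ih]
      simp [h]

-- ===== VERDICT (by name: the statement is the Claim_ definition above) =====
theorem group_by_artifacts_spec : Claim_equal_group_by_artifacts := by
  intro build_urls _
  show _ = _
  unfold group_by_artifacts group_by_artifacts_alt
  rw [stepfun_eq,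
    show (PySem.Dict.ofList [("apk", ([] : List String)), ("deb", []), ("binary", []), ("tgz", []), ("rpm", []), ("performance", [])])
      = pvMk6 [] [] [] [] [] [] from by decide,
    fold_invariant]
  simp
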